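-- pv_equiv track=rewrite | github.com/stateechien/mini-bmc | redfish-api/server.py | _get_overall_health
-- ===== SOURCE A (Python) =====
-- def _get_overall_health(state: dict) -> str:
--     for sensor in state.get("sensors", []):
--         if sensor.get("status") == "Critical":
--             return "Critical"
--     for sensor in state.get("sensors", []):
--         if sensor.get("status") == "Warning":
--             return "Warning"
--     return "OK"
-- ===== SOURCE B (Python) =====
-- _SEVERITY = {"Critical": 2, "Warning": 1}
-- _LEVELS = ("OK", "Warning", "Critical")
--
-- def _get_overall_health(state: dict) -> str:
--     worst = 0
--     for sensor in state.get("sensors", []):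
--         worst = max(worst, _SEVERITY.get(sensor.get("status"), 0))
--     return _LEVELS[worst]
-- ===== Notes on version B (the rewrite author's own statement) =====
-- stated objective: alternative
-- what changed: Replaces A's two sequential early-return string scans with a single numeric pass: each status is mapped to a severity rank, a running maximum is kept, and the result is looked up in a priority table.
import Mathlib
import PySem

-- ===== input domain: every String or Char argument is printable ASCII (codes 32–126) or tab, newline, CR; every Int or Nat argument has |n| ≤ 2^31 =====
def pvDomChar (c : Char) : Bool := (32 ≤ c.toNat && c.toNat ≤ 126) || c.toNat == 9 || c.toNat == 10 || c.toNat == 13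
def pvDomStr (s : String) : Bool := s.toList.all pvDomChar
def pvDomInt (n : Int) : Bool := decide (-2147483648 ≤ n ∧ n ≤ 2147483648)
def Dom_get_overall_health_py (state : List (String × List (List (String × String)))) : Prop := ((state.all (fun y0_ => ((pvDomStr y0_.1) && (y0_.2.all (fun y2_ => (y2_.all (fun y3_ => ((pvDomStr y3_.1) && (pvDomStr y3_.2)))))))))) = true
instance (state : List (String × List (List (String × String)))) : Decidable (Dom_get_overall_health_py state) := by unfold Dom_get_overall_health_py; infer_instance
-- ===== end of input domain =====

-- B replaces A's two early-return string scans with one numeric pass keeping a running maximum severity rank, then a table lookup (objective: alternative).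

-- ===== PORT A =====
-- sensor.get("status")
def pvStatus (sensor : List (String × String)) : Option String :=
  (PySem.Dict.mk sensor).get? "status"

-- one early-return scan: 'for sensor in sensors: if sensor.get("status") == t: return t'
def pvScan (sensors : List (List (String × String))) (t : String) : Bool :=
  match sensors with
  | [] => false
  | s :: rest => if pvStatus s == some t then true else pvScan rest t

def get_overall_health_py (state : List (String × List (List (String × String)))) : String :=
  let sensors := (PySem.Dict.mk state).getD "sensors" []
  if pvScan sensors "Critical" then "Critical"
  else if pvScan sensors "Warning" then "Warning"
  else "OK"

-- ===== PORT B =====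
-- _SEVERITY.get(status, 0): severity rank of a status
def pvSeverity (s : Option String) : Nat :=
  (PySem.Dict.mk [("Critical", 2), ("Warning", 1)]).getD (match s with | some t => t | none => "") 0 *
    (match s with | some _ => 1 | none => 0)   -- None never matches a string key

-- _LEVELS[worst]
def pvLevel (n : Nat) : String :=
  match n with
  | 0 => "OK"
  | 1 => "Warning"
  | _ => "Critical"

def get_overall_health_py_alt (state : List (String × List (List (String × String)))) : String :=
  let sensors := (PySem.Dict.mk state).getD "sensors" []
  let worst := sensors.foldl (fun acc sen => max acc (pvSeverity (pvStatus sen))) 0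
  pvLevel worst

-- ===== PRECONDITION & SPEC =====
def Spec_get_overall_health_py (state : List (String × List (List (String × String)))) (out : String) : Prop := out = get_overall_health_py_alt state
instance (state : List (String × List (List (String × String)))) (out : String) : Decidable (Spec_get_overall_health_py state out) := by unfold Spec_get_overall_health_py; infer_instance

-- ===== CLAIM (what is proved, stated in full; the proofs are below) =====
def Claim_equal_get_overall_health_py : Prop := ∀ (state : List (String × List (List (String × String)))), Dom_get_overall_health_py state → Spec_get_overall_health_py state (get_overall_health_py state)

-- ===== LEMMAS AND PROOFS =====

def pvWorst (sensors : List (List (String × String))) (acc : Nat) : Nat :=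
  sensors.foldl (fun a sen => max a (pvSeverity (pvStatus sen))) acc

theorem pvWorst_acc (sensors : List (List (String × String))) (acc : Nat) :
    pvWorst sensors acc = max acc (pvWorst sensors 0) := by
  induction sensors generalizing acc with
  | nil => simp [pvWorst]
  | cons s rest ih =>
      simp only [pvWorst, List.foldl_cons] at *
      rw [ih, ih (max 0 _)]
      omega

theorem pvSeverity_cases (s : Option String) :
    (s = some "Critical" ∧ pvSeverity s = 2) ∨
    (s = some "Warning" ∧ pvSeverity s = 1) ∨
    (s ≠ some "Critical" ∧ s ≠ some "Warning" ∧ pvSeverity s = 0) := by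
  match s with
  | none => right; right; exact ⟨by simp, by simp, rfl⟩
  | some t =>
      by_cases h1 : t = "Critical"
      · left; subst h1; exact ⟨rfl, rfl⟩
      · by_cases h2 : t = "Warning"
        · right; left; subst h2; exact ⟨rfl, rfl⟩
        · right; right
          refine ⟨by simpa using h1, by simpa using h2, ?_⟩
          have e1 : ("Critical" == t) = false := beq_eq_false_iff_ne.mpr (fun h => h1 h.symm)
          have e2 : ("Warning" == t) = false := beq_eq_false_iff_ne.mpr (fun h => h2 h.symm)
          simp [pvSeverity, PySem.Dict.getD, PySem.Dict.get?, List.find?, e1, e2]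

theorem pvWorst_spec (sensors : List (List (String × String))) :
    (pvWorst sensors 0 = 2 ↔ pvScan sensors "Critical" = true) ∧
    (pvWorst sensors 0 = 1 ↔ (pvScan sensors "Critical" = false ∧ pvScan sensors "Warning" = true)) ∧
    pvWorst sensors 0 ≤ 2 := by
  induction sensors with
  | nil => refine ⟨by simp [pvWorst, pvScan], by simp [pvWorst, pvScan], by simp [pvWorst]⟩
  | cons s rest ih =>
      obtain ⟨ih2, ih1, ihb⟩ := ih
      have hstep : pvWorst (s :: rest) 0 = max (pvSeverity (pvStatus s)) (pvWorst rest 0) := by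
        have h0 : pvWorst (s :: rest) 0 = pvWorst rest (max 0 (pvSeverity (pvStatus s))) := rfl
        rw [h0, pvWorst_acc]
        omega
      rcases pvSeverity_cases (pvStatus s) with ⟨hs, hv⟩ | ⟨hs, hv⟩ | ⟨hs1, hs2, hv⟩
      · constructor
        · constructor <;> intro _
          · simp [pvScan, hs]
          · rw [hstep, hv]; omega
        · constructor
          · constructor <;> intro h
            · exfalso; rw [hstep, hv] at h; omega
            · simp [pvScan, hs] at h
          · rw [hstep, hv]; omega
      · have hnc : (pvStatus s == some "Critical") = false := by simp [hs]
        constructor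
        · rw [hstep, hv]
          simp only [pvScan, hnc]
          constructor <;> intro h
          · exact ih2.mp (by omega)
          · have := ih2.mpr h; omega
        · constructor
          · rw [hstep, hv]
            simp only [pvScan, hs]
            constructor <;> intro h
            · refine ⟨?_, by simp⟩
              by_contra hc
              have : pvScan rest "Critical" = true := by
                cases hcc : pvScan rest "Critical" with
                | true => rfl
                | false => exact absurd hcc hc
              have := ih2.mpr this; omega
            · have hle : pvWorst rest 0 ≠ 2 := fun h2 => by
                rw [ih2] at h2; rw [h2] at h; simp at h
              omega
          · rw [hstep, hv]; omega
      · have hnc : (pvStatus s == some "Critical") = false := by simp [hs1]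
        have hnw : (pvStatus s == some "Warning") = false := by simp [hs2]
        rw [hstep, hv]
        simp only [pvScan, hnc, hnw, Bool.false_eq_true, if_false]
        refine ⟨⟨fun h => ih2.mp (by omega), fun h => by have := ih2.mpr h; omega⟩,
                ⟨fun h => ?_, fun h => by have := ih1.mpr h; omega⟩,
                by omega⟩
        exact ih1.mp (by omega)

-- ===== VERDICT (by name: the statement is the Claim_ definition above) =====
theorem get_overall_health_py_spec : Claim_equal_get_overall_health_py := by
  intro state _
  unfold Spec_get_overall_health_py get_overall_health_py get_overall_health_py_alt
  set sensors := (PySem.Dict.mk state).getD "sensors" [] with hs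
  obtain ⟨h2, h1, hb⟩ := pvWorst_spec sensors
  show _ = pvLevel (pvWorst sensors 0)
  by_cases hc : pvScan sensors "Critical" = true
  · have := h2.mpr hc
    simp [hc, this, pvLevel]
  · have hcf : pvScan sensors "Critical" = false := by
      cases h : pvScan sensors "Critical" with
      | true => exact absurd h hc
      | false => rfl
    by_cases hw : pvScan sensors "Warning" = true
    · have := h1.mpr ⟨hcf, hw⟩
      simp [hcf, hw, this, pvLevel]
    · have hwf : pvScan sensors "Warning" = false := by
        cases h : pvScan sensors "Warning" with
        | true => exact absurd h hw
        | false => rfl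
      have hne2 : pvWorst sensors 0 ≠ 2 := fun h => by rw [h2] at h; rw [h] at hcf; simp at hcf
      have hne1 : pvWorst sensors 0 ≠ 1 := fun h => by
        have := (h1.mp h).2; rw [this] at hwf; simp at hwf
      have h0 : pvWorst sensors 0 = 0 := by omega
      simp [hcf, hwf, h0, pvLevel]
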